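-- pv_equiv track=rewrite | github.com/Andrew21430/Football-Database | test2.py | Hollow_diamond
-- ===== SOURCE A (Python) =====
-- def Hollow_diamond(size):
--     row = []
--     increase = 0
--     for i in range(1,size+1):
--         increase = increase - i
--         spaces = size - i
--         if i == 1:
--             row.append(' '*spaces +'*'+ ' '*spaces)
--         else:
--             line = ' '*spaces + '*' + ' '*(((i-1)*2)-1) + '*' + ' '*spaces
--             row.append(line)
--             if i == size:
--                 for x in range(1 ,i):
--                     spaces = size - (i-x)
--                     if x == i-1:
--                         row.append(' '*spaces + '*')
--                     else:
--                         line = ' '*spaces + '*' + ' '*((((i-x)-1)*2)-1) + '*'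
--                         row.append(line)
--     return row
-- ===== SOURCE B (Python) =====
-- def _row(size, r):
--     top = r < size
--     j = r + 1 if top else 2 * size - 1 - r
--     spaces = size - j
--     core = ' ' * spaces + '*' if j == 1 else ' ' * spaces + '*' + ' ' * (2 * j - 3) + '*'
--     return core + (' ' * spaces if top else '')
--
-- def Hollow_diamond(size):
--     return [_row(size, r) for r in range(2 * size - 1)]
-- ===== Notes on version B (the rewrite author's own statement) =====
-- stated objective: simpler
-- what changed: Replaces A's stateful loop with a nested special-cased bottom loop by a single comprehension over all 2*size-1 row indices, mapping each index to its star level and emitting the row directly (trailing spaces only on top-half rows).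
import Mathlib
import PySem

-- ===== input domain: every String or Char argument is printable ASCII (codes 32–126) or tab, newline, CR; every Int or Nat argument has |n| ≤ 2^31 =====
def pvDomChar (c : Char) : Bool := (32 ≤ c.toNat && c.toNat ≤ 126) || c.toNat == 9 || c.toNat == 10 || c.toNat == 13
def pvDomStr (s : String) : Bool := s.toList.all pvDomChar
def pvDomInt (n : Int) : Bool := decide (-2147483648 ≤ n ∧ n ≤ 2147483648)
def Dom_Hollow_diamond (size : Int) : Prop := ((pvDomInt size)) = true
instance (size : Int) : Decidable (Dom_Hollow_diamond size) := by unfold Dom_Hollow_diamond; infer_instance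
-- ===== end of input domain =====

-- B replaces A's stateful loop (with its nested bottom-half loop) by one map over all 2*size-1 row indices; objective: simpler.


-- ===== PORT A =====
-- ' ' * n  (Python: empty for n ≤ 0); shared by both ports
def pvSp (n : Int) : String := String.ofList (List.replicate n.toNat ' ')

def Hollow_diamond (size : Int) : List String :=
  (((PySem.List.pyRange 1 (size + 1) 1).foldl
      (fun (st : List String × Int) i =>
        ((let spaces := size - i
          if i = 1 then
            st.1 ++ [pvSp spaces ++ "*" ++ pvSp spaces]
          else
            let line := pvSp spaces ++ "*" ++ pvSp ((i - 1) * 2 - 1) ++ "*" ++ pvSp spaces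
            let row := st.1 ++ [line]
            if i = size then
              (PySem.List.pyRange 1 i 1).foldl
                (fun r x =>
                  let spaces := size - (i - x)
                  if x = i - 1 then r ++ [pvSp spaces ++ "*"]
                  else r ++ [pvSp spaces ++ "*" ++ pvSp (((i - x) - 1) * 2 - 1) ++ "*"]) row
            else row),
         st.2 - i))
      ([], 0)).1)

-- ===== PORT B =====
def pvRowB (size r : Int) : String :=
  let top := r < size
  let j := if top then r + 1 else 2 * size - 1 - r
  let spaces := size - j
  let core := if j = 1 then pvSp spaces ++ "*" else pvSp spaces ++ "*" ++ pvSp (2 * j - 3) ++ "*"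
  core ++ (if top then pvSp spaces else "")

def Hollow_diamond_alt (size : Int) : List String :=
  (PySem.List.pyRange 0 (2 * size - 1) 1).map (pvRowB size)

-- ===== PRECONDITION & SPEC =====
def Spec_Hollow_diamond (size : Int) (out : List String) : Prop := out = Hollow_diamond_alt size
instance (size : Int) (out : List String) : Decidable (Spec_Hollow_diamond size out) := by unfold Spec_Hollow_diamond; infer_instance

-- ===== CLAIM (what is proved, stated in full; the proofs are below) =====
def Claim_equal_Hollow_diamond : Prop := ∀ (size : Int), Dom_Hollow_diamond size → Spec_Hollow_diamond size (Hollow_diamond size)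

-- ===== LEMMAS AND PROOFS =====

-- the row A emits at top-half level i (1 ≤ i ≤ size)
def pvTopRow (size i : Int) : String :=
  if i = 1 then pvSp (size - i) ++ "*" ++ pvSp (size - i)
  else pvSp (size - i) ++ "*" ++ pvSp ((i - 1) * 2 - 1) ++ "*" ++ pvSp (size - i)

-- the row A's inner loop emits at x (1 ≤ x ≤ size-1), with i = size
def pvBotRow (size x : Int) : String :=
  if x = size - 1 then pvSp (size - (size - x)) ++ "*"
  else pvSp (size - (size - x)) ++ "*" ++ pvSp (((size - x) - 1) * 2 - 1) ++ "*"

theorem pvInner_eq (size : Int) (l : List Int) (acc : List String) :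
    l.foldl
      (fun r x =>
        let spaces := size - (size - x)
        if x = size - 1 then r ++ [pvSp spaces ++ "*"]
        else r ++ [pvSp spaces ++ "*" ++ pvSp (((size - x) - 1) * 2 - 1) ++ "*"]) acc
      = acc ++ l.map (pvBotRow size) := by
  induction l generalizing acc with
  | nil => simp
  | cons x xs ih =>
    simp only [List.foldl_cons, List.map_cons, ih, pvBotRow]
    split_ifs <;> simp

theorem pvTopFold_eq (size : Int) (l : List Int) (acc : List String)
    (h : ∀ i ∈ l, i ≠ size) :
    l.foldl
      (fun row i =>
        let spaces := size - i
        if i = 1 then row ++ [pvSp spaces ++ "*" ++ pvSp spaces]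
        else
          let line := pvSp spaces ++ "*" ++ pvSp ((i - 1) * 2 - 1) ++ "*" ++ pvSp spaces
          let row := row ++ [line]
          if i = size then
            (PySem.List.pyRange 1 i 1).foldl
              (fun r x =>
                let spaces := size - (i - x)
                if x = i - 1 then r ++ [pvSp spaces ++ "*"]
                else r ++ [pvSp spaces ++ "*" ++ pvSp (((i - x) - 1) * 2 - 1) ++ "*"]) row
          else row) acc
      = acc ++ l.map (pvTopRow size) := by
  induction l generalizing acc with
  | nil => simp
  | cons x xs ih =>
    have hx := h x (by simp)
    simp only [List.foldl_cons, List.map_cons, ih _ (fun i hi => h i (by simp [hi])), pvTopRow]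
    split_ifs <;> simp_all

theorem pvA_eq (size : Int) (h : 1 ≤ size) :
    Hollow_diamond size
      = (PySem.List.pyRange 1 (size + 1) 1).map (pvTopRow size)
        ++ (PySem.List.pyRange 1 size 1).map (pvBotRow size) := by
  unfold Hollow_diamond
  rw [PySem.List.foldl_prod_mk
        (f := fun row (i : Int) =>
          let spaces := size - i
          if i = 1 then row ++ [pvSp spaces ++ "*" ++ pvSp spaces]
          else
            let line := pvSp spaces ++ "*" ++ pvSp ((i - 1) * 2 - 1) ++ "*" ++ pvSp spaces
            let row := row ++ [line]
            if i = size then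
              (PySem.List.pyRange 1 i 1).foldl
                (fun r x =>
                  let spaces := size - (i - x)
                  if x = i - 1 then r ++ [pvSp spaces ++ "*"]
                  else r ++ [pvSp spaces ++ "*" ++ pvSp (((i - x) - 1) * 2 - 1) ++ "*"]) row
            else row)
        (g := fun (acc : Int) i => acc - i)]
  simp only
  rw [PySem.List.pyRange_one_succ_right (by omega)]
  rw [List.foldl_append]
  rw [pvTopFold_eq size _ [] (fun i hi => by
        have := (PySem.List.mem_pyRange_one).1 hi; omega)]
  simp only [List.foldl_cons, List.foldl_nil, List.nil_append]
  by_cases h1 : size = 1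
  · subst h1
    simp [PySem.List.pyRange_one_eq_nil, pvTopRow]
  · simp only [if_neg h1]
    rw [pvInner_eq size]
    simp [pvTopRow, h1]

theorem pvB_top (size : Int) (h : 1 ≤ size) :
    (PySem.List.pyRange 0 size 1).map (pvRowB size)
      = (PySem.List.pyRange 1 (size + 1) 1).map (pvTopRow size) := by
  rw [PySem.List.pyRange_one, PySem.List.pyRange_one]
  have hn : (size - 0).toNat = (size + 1 - 1).toNat := by omega
  rw [hn]
  simp only [List.map_map]
  apply List.map_congr_left
  intro k hk
  have hk' : (k : Int) < size := by
    have := List.mem_range.1 hk; omega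
  simp only [Function.comp, pvRowB, pvTopRow]
  have htop : ((0 : Int) + k < size) := by omega
  simp only [if_pos htop]
  by_cases h1 : (0 : Int) + k + 1 = 1
  · have hk0 : (1 : Int) + k = 1 := by omega
    rw [if_pos h1, if_pos hk0]
    have e1 : (size - ((0 : Int) + k + 1) : Int) = size - (1 + k) := by ring
    rw [e1]
  · have hk0 : ¬ ((1 : Int) + k = 1) := by omega
    rw [if_neg h1, if_neg hk0]
    have e1 : (size - (1 + (k : Int)) : Int) = size - (0 + k + 1) := by ring
    have e2 : ((1 + (k : Int) - 1) * 2 - 1 : Int) = 2 * (0 + k + 1) - 3 := by ring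
    rw [e1, e2]

theorem pvB_bot (size : Int) (h : 1 ≤ size) :
    (PySem.List.pyRange size (2 * size - 1) 1).map (pvRowB size)
      = (PySem.List.pyRange 1 size 1).map (pvBotRow size) := by
  rw [PySem.List.pyRange_one, PySem.List.pyRange_one]
  have hn : (2 * size - 1 - size).toNat = (size - 1).toNat := by omega
  rw [hn]
  simp only [List.map_map]
  apply List.map_congr_left
  intro k _
  simp only [Function.comp, pvRowB, pvBotRow]
  have htop : ¬ (size + (k : Int) < size) := by omega
  simp only [if_neg htop]
  by_cases h1 : (2 * size - 1 - (size + (k : Int)) : Int) = 1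
  · have hx : (1 : Int) + k = size - 1 := by omega
    rw [if_pos h1, if_pos hx]
    have e1 : (size - (2 * size - 1 - (size + (k : Int))) : Int)
        = size - (size - (1 + k)) := by omega
    rw [e1]
    simp
  · have hx : ¬ ((1 : Int) + k = size - 1) := by omega
    rw [if_neg h1, if_neg hx]
    have e1 : (size - (2 * size - 1 - (size + (k : Int))) : Int)
        = size - (size - (1 + k)) := by ring
    have e2 : (2 * (2 * size - 1 - (size + (k : Int))) - 3 : Int)
        = (size - (1 + k) - 1) * 2 - 1 := by ring
    rw [e1, e2]
    simp

-- ===== VERDICT (by name: the statement is the Claim_ definition above) =====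
theorem Hollow_diamond_spec : Claim_equal_Hollow_diamond := by
  intro size _
  unfold Spec_Hollow_diamond
  by_cases h : 1 ≤ size
  · unfold Hollow_diamond_alt
    rw [PySem.List.pyRange_one_append 0 size (2 * size - 1) (by omega) (by omega)]
    rw [List.map_append, pvB_top size h, pvB_bot size h, pvA_eq size h]
  · unfold Hollow_diamond Hollow_diamond_alt
    rw [PySem.List.pyRange_one_eq_nil (by omega), PySem.List.pyRange_one_eq_nil (by omega)]
    simp
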